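-- pv_equiv track=rewrite | github.com/squzyy/Informatika_EGE | 14.py | to_18
-- ===== SOURCE A (Python) =====
-- def to_18(n):
--     s = ''
--     while n > 0:
--         digit = n % 18
--         if digit < 10:
--             s = str(digit) + s
--         else:
--             s = chr(ord('A')+ digit - 10) + s
--         n //= 18
--     return s
-- ===== SOURCE B (Python) =====
-- def _digit(d):
--     return str(d) if d < 10 else chr(ord('A') + d - 10)
--
-- def to_18(n):
--     if n <= 0:
--         return ''
--     return to_18(n // 18) + _digit(n % 18)
-- ===== Notes on version B (the rewrite author's own statement) =====
-- stated objective: simpler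
-- what changed: Replaced the while-loop that prepends digits to an accumulator string with a linear recursion on the quotient that appends the low-order digit after the recursive call.
import Mathlib
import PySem

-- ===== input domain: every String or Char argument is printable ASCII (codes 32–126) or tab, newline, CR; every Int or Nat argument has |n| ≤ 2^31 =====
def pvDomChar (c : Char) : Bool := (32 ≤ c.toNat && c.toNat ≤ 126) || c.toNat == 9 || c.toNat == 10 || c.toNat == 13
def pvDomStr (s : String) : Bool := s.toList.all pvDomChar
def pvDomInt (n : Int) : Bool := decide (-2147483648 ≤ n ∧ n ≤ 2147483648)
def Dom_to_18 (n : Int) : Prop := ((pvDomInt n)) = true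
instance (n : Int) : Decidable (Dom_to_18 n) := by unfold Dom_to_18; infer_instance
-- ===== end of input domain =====

-- B replaces A's while-loop with string-prepending accumulator by a linear recursion on the
-- quotient that appends the low-order digit after the recursive call (objective: simpler).


-- termination helper for both ports
theorem pvFloordiv18_lt (n : Int) (h : 0 < n) :
    (PySem.Int.floordiv n 18).toNat < n.toNat := by
  rw [PySem.Int.floordiv_eq_ediv_of_pos (by norm_num)]
  omega

-- ===== PORT A =====
def to_18_loop (n : Int) (s : String) : String :=
  if h : n > 0 then
    let digit := PySem.Int.mod n 18
    let s' := if digit < 10 then PySem.Int.toStr digit ++ s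
              else String.ofList [Char.ofNat ('A'.toNat + digit.toNat - 10)] ++ s
    to_18_loop (PySem.Int.floordiv n 18) s'
  else s
termination_by n.toNat
decreasing_by exact pvFloordiv18_lt n h

def to_18 (n : Int) : String := to_18_loop n ""

-- ===== PORT B =====
def pvDigit18 (d : Int) : String :=
  if d < 10 then PySem.Int.toStr d else String.ofList [Char.ofNat ('A'.toNat + (d - 10).toNat)]

def to_18_alt (n : Int) : String :=
  if h : n ≤ 0 then ""
  else to_18_alt (PySem.Int.floordiv n 18) ++ pvDigit18 (PySem.Int.mod n 18)
termination_by n.toNat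
decreasing_by exact pvFloordiv18_lt n (by omega)

-- ===== PRECONDITION & SPEC =====
def Spec_to_18 (n : Int) (out : String) : Prop := out = to_18_alt n
instance (n : Int) (out : String) : Decidable (Spec_to_18 n out) := by unfold Spec_to_18; infer_instance

-- ===== CLAIM (what is proved, stated in full; the proofs are below) =====
def Claim_equal_to_18 : Prop := ∀ (n : Int), Dom_to_18 n → Spec_to_18 n (to_18 n)

-- ===== LEMMAS AND PROOFS =====
theorem pvLoop_eq : ∀ (k : Nat) (n : Int), n.toNat = k → ∀ s, to_18_loop n s = to_18_alt n ++ s := by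
  intro k
  induction k using Nat.strong_induction_on with
  | _ k ih =>
    intro n hk s
    rw [to_18_loop, to_18_alt]
    by_cases h : n > 0
    · rw [dif_pos h, dif_neg (by omega)]
      have hd0 : 0 ≤ PySem.Int.mod n 18 := PySem.Int.mod_nonneg n (by norm_num)
      have hrec := ih (PySem.Int.floordiv n 18).toNat (hk ▸ pvFloordiv18_lt n h)
          (PySem.Int.floordiv n 18) rfl
      rw [hrec, String.append_assoc]
      congr 1
      unfold pvDigit18
      by_cases hlt : PySem.Int.mod n 18 < 10
      · rw [if_pos hlt, if_pos hlt]
      · rw [if_neg hlt, if_neg hlt]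
        have hnum : 'A'.toNat + (PySem.Int.mod n 18).toNat - 10
            = 'A'.toNat + (PySem.Int.mod n 18 - 10).toNat := by omega
        rw [hnum]
    · rw [dif_neg h, dif_pos (by omega)]
      exact String.empty_append.symm

-- ===== VERDICT (by name: the statement is the Claim_ definition above) =====
theorem to_18_spec : Claim_equal_to_18 := by
  intro n _
  unfold Spec_to_18 to_18
  rw [pvLoop_eq n.toNat n rfl ""]
  exact String.append_empty
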